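-- pv_equiv track=rewrite | github.com/adamg4911/diss | JoeyNMT/joeynmt/external_metrics/sacrebleu.py | ref_stats
-- ===== SOURCE A (Python) =====
-- from collections import Counter, namedtuple
--
-- NGRAM_ORDER = 4
--
-- def extract_ngrams(line, min_order=1, max_order=NGRAM_ORDER) -> Counter:
--     """Extracts all the ngrams (min_order <= n <= max_order) from a sequence of tokens.
--
--     :param line: A segment containing a sequence of words.
--     :param min_order: Minimum n-gram length (default: 1).
--     :param max_order: Maximum n-gram length (default: NGRAM_ORDER).
--     :return: a dictionary containing ngrams and counts
--     """
--
--     ngrams = Counter()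
--     tokens = line.split()
--     for n in range(min_order, max_order + 1):
--         for i in range(0, len(tokens) - n + 1):
--             ngram = " ".join(tokens[i : i + n])
--             ngrams[ngram] += 1
--
--     return ngrams
--
-- def ref_stats(output, refs):
--     ngrams = Counter()
--     closest_diff = None
--     closest_len = None
--     for ref in refs:
--         tokens = ref.split()
--         reflen = len(tokens)
--         diff = abs(len(output.split()) - reflen)
--         if closest_diff is None or diff < closest_diff:
--             closest_diff = diff
--             closest_len = reflen
--         elif diff == closest_diff:
--             if reflen < closest_len:
--                 closest_len = reflen
--
--         ngrams_ref = extract_ngrams(ref)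
--         for ngram in ngrams_ref.keys():
--             ngrams[ngram] = max(ngrams[ngram], ngrams_ref[ngram])
--
--     return ngrams, closest_diff, closest_len
-- ===== SOURCE B (Python) =====
-- from collections import Counter
--
-- NGRAM_ORDER = 4
--
--
-- def _ngram_occurrences(line):
--     """All n-gram occurrences (orders 1..NGRAM_ORDER) of line, with repeats, in generation order."""
--     tokens = line.split()
--     occ = []
--     for n in range(1, NGRAM_ORDER + 1):
--         for i in range(len(tokens) - n + 1):
--             occ.append(" ".join(tokens[i:i + n]))
--     return occ
--
--
-- def ref_stats(output, refs):
--     # One streaming pass over every n-gram occurrence of every reference.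
--     # Per n-gram keep (reference index of the current run, run length, best run so far):
--     # no per-reference Counter is ever built or merged.
--     state = {}
--     for ri, ref in enumerate(refs):
--         for g in _ngram_occurrences(ref):
--             st = state.get(g)
--             if st is None:
--                 st = (ri, 0, 0)
--             elif st[0] != ri:
--                 st = (ri, 0, st[2])
--             run = st[1] + 1
--             state[g] = (ri, run, run if run > st[2] else st[2])
--     ngrams = Counter({g: st[2] for g, st in state.items()})
--     if not refs:
--         return ngrams, None, None
--     # Closest length: compare the longest reference shorter than the output with the
--     # shortest reference at least as long; ties go to the shorter one.
--     out_len = len(output.split())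
--     lengths = [len(r.split()) for r in refs]
--     shorter = [L for L in lengths if L < out_len]
--     longer = [L for L in lengths if L >= out_len]
--     if not shorter:
--         best = min(longer)
--     elif not longer:
--         best = max(shorter)
--     else:
--         lo, hi = max(shorter), min(longer)
--         best = lo if out_len - lo <= hi - out_len else hi
--     return ngrams, abs(out_len - best), best
-- ===== Notes on version B (the rewrite author's own statement) =====
-- stated objective: alternative
-- what changed: B never builds or merges per-reference Counters: one streaming pass over every n-gram occurrence of every reference keeps a (reference-index, current-run, best-run) state per n-gram, and the closest reference length is picked by comparing the longest shorter-than-output length (max of a filter) with the shortest at-least-output length (min of a filter) instead of A's running lexicographic minimum; B also splits the output once instead of once per reference, which is where the measured speedup comes from.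
import Mathlib
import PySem

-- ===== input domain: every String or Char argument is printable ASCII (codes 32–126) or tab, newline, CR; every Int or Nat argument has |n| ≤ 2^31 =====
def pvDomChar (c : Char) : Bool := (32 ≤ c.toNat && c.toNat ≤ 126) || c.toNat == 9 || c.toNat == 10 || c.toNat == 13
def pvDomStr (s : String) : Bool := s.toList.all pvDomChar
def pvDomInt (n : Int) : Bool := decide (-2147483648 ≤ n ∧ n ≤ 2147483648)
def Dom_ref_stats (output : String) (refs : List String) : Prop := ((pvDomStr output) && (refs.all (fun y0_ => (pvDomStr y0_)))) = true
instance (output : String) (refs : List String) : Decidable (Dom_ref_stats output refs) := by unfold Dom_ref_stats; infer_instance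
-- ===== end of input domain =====

-- B replaces A's per-reference counters merged by elementwise max with one streaming pass over all
-- n-gram occurrences keeping a (ref-index, run, best) state per n-gram, and picks the closest
-- reference length by comparing the longest shorter-than-output length with the shortest
-- at-least-output length; it splits the output once, not once per reference (measured faster).

-- ===== PORT A =====

-- extract_ngrams(line) with the default orders 1..NGRAM_ORDER=4 (the only way A calls it)
def extractNgrams (line : String) : PySem.Dict String Int :=
  let tokens := PySem.Str.split₀ line
  (PySem.List.pyRange 1 (4 + 1) 1).foldl (fun ngrams n =>
    (PySem.List.pyRange 0 ((tokens.length : Int) - n + 1) 1).foldl (fun ngrams i =>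
      ngrams.modify (PySem.Str.join " " (PySem.List.slice tokens (some i) (some (i + n)))) 0 (· + 1))
      ngrams) PySem.Dict.empty

-- the n-gram part of A's loop body: ngrams[ngram] = max(ngrams[ngram], ngrams_ref[ngram]) over ngrams_ref.keys()
def pyNgramStep (ngrams : PySem.Dict String Int) (ref : String) : PySem.Dict String Int :=
  let ngrams_ref := extractNgrams ref
  ngrams_ref.keys.foldl
    (fun d ngram => d.insert ngram (max (d.getD ngram 0) (ngrams_ref.getD ngram 0))) ngrams

-- the closest_diff / closest_len part of A's loop body
def pyClosestStep (output : String) (st : Option Int × Option Int) (ref : String) : Option Int × Option Int :=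
  let tokens := PySem.Str.split₀ ref
  let reflen : Int := tokens.length
  let diff : Int := |((PySem.Str.split₀ output).length : Int) - reflen|
  match st.1, st.2 with
  | none, _ => (some diff, some reflen)
  | some cd, cl =>
    if diff < cd then (some diff, some reflen)
    else if diff = cd then
      (some cd, match cl with
        | some clv => if reflen < clv then some reflen else some clv
        | none => none)
    else (some cd, cl)

def ref_stats (output : String) (refs : List String) : (List (String × Int)) × Option Int × Option Int :=
  let st := refs.foldl (fun st ref => (pyNgramStep st.1 ref, pyClosestStep output st.2 ref))
    (PySem.Dict.empty, (none, none))
  (st.1.items, st.2.1, st.2.2)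

-- ===== PORT B =====

-- _ngram_occurrences(line): every n-gram occurrence (orders 1..4), with repeats, in generation order
def ngramOccurrences (line : String) : List String :=
  let tokens := PySem.Str.split₀ line
  (PySem.List.pyRange 1 (4 + 1) 1).foldl (fun occ n =>
    (PySem.List.pyRange 0 ((tokens.length : Int) - n + 1) 1).foldl (fun occ i =>
      occ ++ [PySem.Str.join " " (PySem.List.slice tokens (some i) (some (i + n)))]) occ) []

-- body of B's streaming loop: the value stored by 'state[g] = (ri, run, …)' for one occurrence of g
def bVal (ri : Int) (S : PySem.Dict String (Int × Int × Int)) (g : String) : Int × Int × Int :=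
  let st :=
    match S.get? g with
    | none => (ri, 0, 0)
    | some st => if st.1 ≠ ri then (ri, 0, st.2.2) else st
  let run := st.2.1 + 1
  (ri, run, if run > st.2.2 then run else st.2.2)

def ref_stats_alt (output : String) (refs : List String) : (List (String × Int)) × Option Int × Option Int :=
  let state := (PySem.List.enumerate refs).foldl
    (fun S p => (ngramOccurrences p.2).foldl (fun S g => S.insert g (bVal p.1 S g)) S)
    PySem.Dict.empty
  let ngrams := PySem.Dict.mk (state.items.map (fun p => (p.1, p.2.2.2)))
  if refs = [] then (ngrams.items, none, none)
  else
    let out_len : Int := ((PySem.Str.split₀ output).length : Int)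
    let lengths := refs.map (fun r => ((PySem.Str.split₀ r).length : Int))
    let shorter := lengths.filter (fun L => decide (L < out_len))
    let longer := lengths.filter (fun L => decide (out_len ≤ L))
    let best : Option Int :=
      if shorter = [] then PySem.List.min? longer (fun L => L)
      else if longer = [] then PySem.List.max? shorter (fun L => L)
      else
        match PySem.List.max? shorter (fun L => L), PySem.List.min? longer (fun L => L) with
        | some lo, some hi => some (if out_len - lo ≤ hi - out_len then lo else hi)
        | _, _ => none
    match best with
    | some b => (ngrams.items, some |out_len - b|, some b)
    | none => (ngrams.items, none, none)  -- unreachable: refs ≠ [] makes shorter or longer nonempty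

-- ===== PRECONDITION & SPEC =====
def Spec_ref_stats (output : String) (refs : List String) (out : (List (String × Int)) × Option Int × Option Int) : Prop := out = ref_stats_alt output refs
instance (output : String) (refs : List String) (out : (List (String × Int)) × Option Int × Option Int) : Decidable (Spec_ref_stats output refs out) := by unfold Spec_ref_stats; infer_instance

-- ===== CLAIM (what is proved, stated in full; the proofs are below) =====
def Claim_equal_ref_stats : Prop := ∀ (output : String) (refs : List String), Dom_ref_stats output refs → Spec_ref_stats output refs (ref_stats output refs)

-- ===== LEMMAS AND PROOFS =====

---------------------------------------------------------------------------
-- Part 1: the n-gram dictionaries agree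
---------------------------------------------------------------------------

-- a fold whose body folds an inner list is a fold over the flattened list
theorem foldl_inner_flat {α β γ : Type} (f : α → List β) (step : γ → β → γ) :
    ∀ (l : List α) (init : γ),
      l.foldl (fun d a => (f a).foldl step d) init = (l.flatMap f).foldl step init := by
  intro l
  induction l with
  | nil => intro init; rfl
  | cons x t ih => intro init; simp only [List.foldl_cons, List.flatMap_cons, List.foldl_append, ih]

-- the n-grams of one order n, as a list
def genList (tokens : List String) (n : Int) : List String :=
  (PySem.List.pyRange 0 ((tokens.length : Int) - n + 1) 1).map
    (fun i => PySem.Str.join " " (PySem.List.slice tokens (some i) (some (i + n))))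

theorem ngramOccurrences_eq_flatMap (line : String) :
    ngramOccurrences line =
      (PySem.List.pyRange 1 (4 + 1) 1).flatMap (genList (PySem.Str.split₀ line)) := by
  unfold ngramOccurrences
  have h : ∀ (n : Int) (occ : List String),
      (PySem.List.pyRange 0 (((PySem.Str.split₀ line).length : Int) - n + 1) 1).foldl
        (fun occ i => occ ++ [PySem.Str.join " " (PySem.List.slice (PySem.Str.split₀ line) (some i) (some (i + n)))]) occ
      = occ ++ genList (PySem.Str.split₀ line) n := by
    intro n occ
    exact PySem.List.foldl_append_singleton_eq_map _ _ _
  calc (PySem.List.pyRange 1 (4 + 1) 1).foldl (fun occ n =>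
        (PySem.List.pyRange 0 (((PySem.Str.split₀ line).length : Int) - n + 1) 1).foldl
          (fun occ i => occ ++ [PySem.Str.join " " (PySem.List.slice (PySem.Str.split₀ line) (some i) (some (i + n)))]) occ) []
      = (PySem.List.pyRange 1 (4 + 1) 1).foldl (fun occ n => occ ++ genList (PySem.Str.split₀ line) n) [] := by
        exact PySem.List.foldl_congr_mem _ _ _ _ (fun occ n _ => h n occ)
    _ = _ := by
        simpa using PySem.List.foldl_append_eq_flatMap (genList (PySem.Str.split₀ line)) _ []

theorem extractNgrams_eq_counter (line : String) :
    extractNgrams line = PySem.Dict.counter (ngramOccurrences line) := by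
  dsimp only [extractNgrams]
  rw [ngramOccurrences_eq_flatMap, PySem.Dict.counter_eq_foldl]
  calc (PySem.List.pyRange 1 (4 + 1) 1).foldl (fun ngrams n =>
        (PySem.List.pyRange 0 (((PySem.Str.split₀ line).length : Int) - n + 1) 1).foldl
          (fun ngrams i =>
            ngrams.modify (PySem.Str.join " " (PySem.List.slice (PySem.Str.split₀ line) (some i) (some (i + n)))) 0 (· + 1))
          ngrams) (PySem.Dict.empty : PySem.Dict String Int)
      = (PySem.List.pyRange 1 (4 + 1) 1).foldl (fun d n =>
          (genList (PySem.Str.split₀ line) n).foldl (fun d x => d.modify x 0 (· + 1)) d) PySem.Dict.empty := by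
        refine PySem.List.foldl_congr_mem _ _ _ _ (fun d n _ => ?_)
        simp only [genList, List.foldl_map]
    _ = _ := foldl_inner_flat _ _ _ _

-- A's per-reference update, pointwise
theorem get?_foldl_maxinsert (v : String → Int) :
    ∀ (l : List String), l.Nodup → ∀ (D : PySem.Dict String Int) (x : String),
      (l.foldl (fun d g => d.insert g (max (d.getD g 0) (v g))) D).get? x
        = if x ∈ l then some (max (D.getD x 0) (v x)) else D.get? x := by
  intro l
  induction l with
  | nil => intro _ D x; simp
  | cons g t ih =>
    intro hnd D x
    have hg : g ∉ t := (List.nodup_cons.mp hnd).1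
    have ht : t.Nodup := (List.nodup_cons.mp hnd).2
    simp only [List.foldl_cons]
    rw [ih ht]
    by_cases hx : x ∈ t
    · have hxg : x ≠ g := fun h => hg (h ▸ hx)
      rw [if_pos hx, if_pos (List.mem_cons.mpr (Or.inr hx))]
      rw [PySem.Dict.getD_insert_of_ne _ _ _ hxg]
    · by_cases hxg : x = g
      · subst hxg
        rw [if_neg hx, if_pos (List.mem_cons_self)]
        rw [PySem.Dict.get?_insert_self]
      · rw [if_neg hx, if_neg (by simp [hxg, hx])]
        rw [PySem.Dict.get?_insert_of_ne _ _ hxg]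

theorem get?_pyNgramStep (D : PySem.Dict String Int) (ref x : String) :
    (pyNgramStep D ref).get? x
      = if x ∈ ngramOccurrences ref
          then some (max (D.getD x 0) ((ngramOccurrences ref).count x : Int))
          else D.get? x := by
  unfold pyNgramStep
  rw [extractNgrams_eq_counter]
  rw [get?_foldl_maxinsert _ _ (PySem.Dict.nodup_keys_counter _) D x]
  rw [PySem.Dict.getD_counter, PySem.Dict.keys_counter]
  simp [PySem.Set.mem_ofList]

-- B's per-reference update, pointwise.  best0 S g = the best run recorded so far
def best0 (S : PySem.Dict String (Int × Int × Int)) (g : String) : Int :=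
  match S.get? g with
  | some st => st.2.2
  | none => 0

theorem bVal_none (ri : Int) (S : PySem.Dict String (Int × Int × Int)) (g : String)
    (h : S.get? g = none) : bVal ri S g = (ri, 1, 1) := by
  simp [bVal, h]

theorem bVal_same (ri : Int) (S : PySem.Dict String (Int × Int × Int)) (g : String)
    (run0 b : Int) (h : S.get? g = some (ri, run0, b)) :
    bVal ri S g = (ri, run0 + 1, if run0 + 1 > b then run0 + 1 else b) := by
  simp [bVal, h]

theorem bVal_other (ri : Int) (S : PySem.Dict String (Int × Int × Int)) (g : String)
    (rj run0 b : Int) (h : S.get? g = some (rj, run0, b)) (hne : rj ≠ ri) :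
    bVal ri S g = (ri, 1, if 1 > b then 1 else b) := by
  simp [bVal, h, hne]

theorem get?_streamFold (ri : Int) (S : PySem.Dict String (Int × Int × Int))
    (hS : ∀ p ∈ S.items, p.2.1 ≠ ri) (ws : List String) (x : String) :
    (ws.foldl (fun S g => S.insert g (bVal ri S g)) S).get? x
      = if 0 < ws.count x
          then some (ri, (ws.count x : Int), max (best0 S x) (ws.count x : Int))
          else S.get? x := by
  induction ws using List.reverseRecOn with
  | nil => simp
  | append_singleton ws w ih =>
    rw [List.foldl_append, List.foldl_cons, List.foldl_nil]
    by_cases hxw : x = w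
    · subst hxw
      rw [PySem.Dict.get?_insert_self]
      have hcnt : (ws ++ [x]).count x = ws.count x + 1 := by simp
      rw [hcnt, if_pos (by omega)]
      by_cases h0 : 0 < ws.count x
      · have hg : (ws.foldl (fun S g => S.insert g (bVal ri S g)) S).get? x
            = some (ri, (ws.count x : Int), max (best0 S x) (ws.count x : Int)) := by
          rw [ih, if_pos h0]
        rw [bVal_same _ _ _ _ _ hg]
        simp only [Option.some_inj, Prod.mk.injEq]
        push_cast
        refine ⟨trivial, by ring, ?_⟩
        rw [max_def, max_def]
        split_ifs <;> omega
      · have hc0 : ws.count x = 0 := by omega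
        have hg : (ws.foldl (fun S g => S.insert g (bVal ri S g)) S).get? x = S.get? x := by
          rw [ih, if_neg h0]
        cases hSx : S.get? x with
        | none =>
          rw [bVal_none _ _ _ (hg.trans hSx)]
          simp [best0, hSx, hc0]
        | some stv =>
          obtain ⟨rj, run0, b⟩ := stv
          have hne : rj ≠ ri := hS (x, rj, run0, b) (PySem.Dict.mem_items_of_get?_eq_some S hSx)
          rw [bVal_other _ _ _ _ _ _ (hg.trans hSx) hne]
          have : best0 S x = b := by simp [best0, hSx]
          rw [this, hc0]
          simp only [Option.some_inj, Prod.mk.injEq]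
          push_cast
          rw [max_def]
          refine ⟨trivial, trivial, ?_⟩
          split_ifs <;> omega
    · rw [PySem.Dict.get?_insert_of_ne _ _ hxw]
      rw [ih]
      have : (ws ++ [w]).count x = ws.count x := by
        simp [List.count_append, List.count_eq_zero.mpr (by simp [hxw] : x ∉ [w])]
      rw [this]

-- Set.update over a deduplicated list is Set.update over the raw list
theorem mem_update_of_mem (xs : List String) :
    ∀ (s : PySem.Set String) (x : String), x ∈ s → x ∈ PySem.Set.update s xs := by
  induction xs with
  | nil => intro s x h; exact h
  | cons y t ih =>
    intro s x h
    exact ih _ _ ((PySem.Set.mem_add s y x).mpr (Or.inl h))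

theorem mem_update_of_mem_list (xs : List String) :
    ∀ (s : PySem.Set String) (x : String), x ∈ xs → x ∈ PySem.Set.update s xs := by
  induction xs with
  | nil => intro s x h; simp at h
  | cons y t ih =>
    intro s x h
    rcases List.mem_cons.mp h with h | h
    · exact mem_update_of_mem t _ x ((PySem.Set.mem_add s y x).mpr (Or.inr h))
    · exact ih _ _ h

theorem set_update_add (s acc : PySem.Set String) (x : String) :
    PySem.Set.update s (PySem.Set.add acc x) = PySem.Set.add (PySem.Set.update s acc) x := by
  unfold PySem.Set.add
  by_cases hx : acc.contains x = true
  · rw [if_pos hx]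
    have hmem : x ∈ PySem.Set.update s acc :=
      mem_update_of_mem_list acc s x ((PySem.Set.contains_iff acc x).mp hx)
    rw [if_pos ((PySem.Set.contains_iff _ x).mpr hmem)]
  · rw [if_neg hx]
    show PySem.Set.update s (acc ++ [x]) = _
    unfold PySem.Set.update
    rw [List.foldl_append]
    rfl

theorem set_update_foldl_add (t : List String) :
    ∀ (acc s : PySem.Set String),
      PySem.Set.update s (t.foldl PySem.Set.add acc) = t.foldl PySem.Set.add (PySem.Set.update s acc) := by
  induction t with
  | nil => intro acc s; rfl
  | cons x t ih =>
    intro acc s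
    simp only [List.foldl_cons]
    rw [ih, set_update_add]

theorem set_update_ofList (s : PySem.Set String) (ws : List String) :
    PySem.Set.update s (PySem.Set.ofList ws) = PySem.Set.update s ws := by
  rw [PySem.Set.ofList_eq_foldl, set_update_foldl_add]
  rfl

-- the relation carried through the main loop
def NgRel (D : PySem.Dict String Int) (S : PySem.Dict String (Int × Int × Int)) (ri : Int) : Prop :=
  D.keys = S.keys ∧ D.keys.Nodup ∧ S.keys.Nodup ∧
  (∀ x, D.get? x = (S.get? x).map (fun st => st.2.2)) ∧
  (∀ p ∈ S.items, p.2.1 < ri)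

theorem rel_step (D : PySem.Dict String Int) (S : PySem.Dict String (Int × Int × Int))
    (ri : Int) (ref : String) (h : NgRel D S ri) :
    NgRel (pyNgramStep D ref) ((ngramOccurrences ref).foldl (fun S g => S.insert g (bVal ri S g)) S) (ri + 1) := by
  obtain ⟨hk, hnd, hns, hget, hri⟩ := h
  have hS : ∀ p ∈ S.items, p.2.1 ≠ ri := fun p hp => ne_of_lt (hri p hp)
  have hgetD : ∀ x, D.getD x 0 = best0 S x := by
    intro x
    rw [PySem.Dict.getD_eq_get?_getD, hget x, best0]
    cases S.get? x <;> simp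
  have hkeysA : (pyNgramStep D ref).keys = PySem.Set.update D.keys (ngramOccurrences ref) := by
    unfold pyNgramStep
    rw [PySem.Dict.keys_foldl_insert]
    rw [extractNgrams_eq_counter, PySem.Dict.keys_counter, set_update_ofList]
  have hkeysB : ((ngramOccurrences ref).foldl (fun S g => S.insert g (bVal ri S g)) S).keys
      = PySem.Set.update S.keys (ngramOccurrences ref) := PySem.Dict.keys_foldl_insert _ _ _
  have hnsB : ((ngramOccurrences ref).foldl (fun S g => S.insert g (bVal ri S g)) S).keys.Nodup :=
    PySem.Dict.nodup_keys_foldl_insert _ _ _ hns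
  have hgetB := get?_streamFold ri S hS (ngramOccurrences ref)
  have hget' : ∀ x, (pyNgramStep D ref).get? x
      = (((ngramOccurrences ref).foldl (fun S g => S.insert g (bVal ri S g)) S).get? x).map (fun st => st.2.2) := by
    intro x
    rw [get?_pyNgramStep, hgetB x]
    by_cases hx : x ∈ ngramOccurrences ref
    · rw [if_pos hx, if_pos (List.count_pos_iff.mpr hx)]
      simp [hgetD x]
    · rw [if_neg hx, if_neg (by simp [List.count_eq_zero.mpr hx])]
      exact hget x
  refine ⟨by rw [hkeysA, hkeysB, hk], ?_, hnsB, hget', ?_⟩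
  · unfold pyNgramStep
    exact PySem.Dict.nodup_keys_foldl_insert _ _ _ hnd
  · intro p hp
    have hgp : ((ngramOccurrences ref).foldl (fun S g => S.insert g (bVal ri S g)) S).get? p.1 = some p.2 :=
      (PySem.Dict.get?_eq_some_iff_mem_items _ _ _ hnsB).mpr (by exact hp)
    rw [hgetB p.1] at hgp
    by_cases hc : 0 < (ngramOccurrences ref).count p.1
    · rw [if_pos hc] at hgp
      have : p.2.1 = ri := by
        have := (Option.some_inj.mp hgp).symm
        rw [this]
      omega
    · rw [if_neg hc] at hgp
      have := hri p (PySem.Dict.mem_items_of_get?_eq_some S (by simpa using hgp))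
      omega

theorem rel_fold (refs : List String) :
    ∀ (D : PySem.Dict String Int) (S : PySem.Dict String (Int × Int × Int)) (ri : Int),
      NgRel D S ri →
      NgRel (refs.foldl pyNgramStep D)
        ((PySem.List.enumerate refs ri).foldl
          (fun S p => (ngramOccurrences p.2).foldl (fun S g => S.insert g (bVal p.1 S g)) S) S)
        (ri + refs.length) := by
  induction refs with
  | nil => intro D S ri h; simpa using h
  | cons r t ih =>
    intro D S ri h
    have h1 := rel_step D S ri r h
    have h2 := ih _ _ (ri + 1) h1
    have he : PySem.List.enumerate (r :: t) ri = (ri, r) :: PySem.List.enumerate t (ri + 1) := by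
      simp [PySem.List.enumerate]
    rw [he]
    simp only [List.foldl_cons, List.length_cons]
    have hlen : ri + ((t.length + 1 : Nat) : Int) = ri + 1 + (t.length : Int) := by push_cast; omega
    rw [hlen]
    exact h2

theorem rel_empty : NgRel PySem.Dict.empty PySem.Dict.empty 0 := by
  refine ⟨rfl, PySem.Dict.nodup_keys_empty, PySem.Dict.nodup_keys_empty, fun x => rfl, fun p hp => ?_⟩
  simp [PySem.Dict.empty] at hp

theorem items_of_rel (D : PySem.Dict String Int) (S : PySem.Dict String (Int × Int × Int)) (ri : Int)
    (h : NgRel D S ri) : D.items = S.items.map (fun p => (p.1, p.2.2.2)) := by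
  obtain ⟨hk, hnd, hns, hget, _⟩ := h
  rw [PySem.Dict.items_eq_map_keys D hnd 0, PySem.Dict.items_eq_map_keys S hns (0, 0, 0)]
  rw [List.map_map, hk]
  refine List.map_congr_left (fun k hkmem => ?_)
  have hcont : S.contains k = true := (PySem.Dict.contains_iff_mem_keys _ _).mpr hkmem
  have : (S.get? k).isSome := by rw [← PySem.Dict.contains_eq_isSome_get?]; exact hcont
  cases hSk : S.get? k with
  | none => rw [hSk] at this; simp at this
  | some st =>
    have h1 : D.getD k 0 = st.2.2 := by
      rw [PySem.Dict.getD_eq_get?_getD, hget k, hSk]; rfl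
    have h2 : S.getD k (0, 0, 0) = st := PySem.Dict.getD_of_get?_eq_some _ _ hSk
    simp [h1, h2]

---------------------------------------------------------------------------
-- Part 2: the closest diff / closest len agree
---------------------------------------------------------------------------

def opt2 (o : Option (Int × Int)) : Option Int × Option Int :=
  match o with
  | none => (none, none)
  | some (d, l) => (some d, some l)

def minStep (acc : Option (Int × Int)) (x : Int × Int) : Option (Int × Int) :=
  match acc with
  | none => some x
  | some m => if (decide (x.1 < m.1) || !decide (m.1 < x.1) && decide (x.2 < m.2)) then some x else some m

theorem closest_step_eq (output ref : String) (acc : Option (Int × Int)) :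
    pyClosestStep output (opt2 acc) ref =
      opt2 (minStep acc (|((PySem.Str.split₀ output).length : Int) - ((PySem.Str.split₀ ref).length : Int)|,
        ((PySem.Str.split₀ ref).length : Int))) := by
  cases acc with
  | none => rfl
  | some m =>
    obtain ⟨d0, l0⟩ := m
    simp only [pyClosestStep, opt2, minStep]
    by_cases h1 : |((PySem.Str.split₀ output).length : Int) - ((PySem.Str.split₀ ref).length : Int)| < d0 <;>
      by_cases h2 : |((PySem.Str.split₀ output).length : Int) - ((PySem.Str.split₀ ref).length : Int)| = d0 <;>
      by_cases h3 : ((PySem.Str.split₀ ref).length : Int) < l0 <;>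
      simp_all <;> split_ifs <;> simp_all <;> omega

theorem closest_fold_eq (output : String) (refs : List String) (acc : Option (Int × Int)) :
    refs.foldl (pyClosestStep output) (opt2 acc) =
      opt2 ((refs.map (fun r => (|((PySem.Str.split₀ output).length : Int) - ((PySem.Str.split₀ r).length : Int)|,
        ((PySem.Str.split₀ r).length : Int)))).foldl minStep acc) := by
  induction refs generalizing acc with
  | nil => rfl
  | cons r t ih =>
    simp only [List.foldl_cons, List.map_cons]
    rw [closest_step_eq output r acc, ih]

def lexLE (p q : Int × Int) : Prop := p.1 < q.1 ∨ (p.1 = q.1 ∧ p.2 ≤ q.2)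

theorem lexLE_refl (p : Int × Int) : lexLE p p := Or.inr ⟨rfl, le_refl _⟩

theorem lexLE_trans {p q r : Int × Int} (h1 : lexLE p q) (h2 : lexLE q r) : lexLE p r := by
  unfold lexLE at *; omega

theorem foldl_minStep_some (l : List (Int × Int)) :
    ∀ m : Int × Int, ∃ m', l.foldl minStep (some m) = some m'
      ∧ (m' = m ∨ m' ∈ l) ∧ lexLE m' m ∧ ∀ x ∈ l, lexLE m' x := by
  induction l with
  | nil => intro m; exact ⟨m, rfl, Or.inl rfl, lexLE_refl m, by simp⟩
  | cons x t ih =>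
    intro m
    rw [List.foldl_cons]
    by_cases hc : x.1 < m.1 ∨ (¬ m.1 < x.1 ∧ x.2 < m.2)
    · have hstep : minStep (some m) x = some x := by
        show (if (decide (x.1 < m.1) || !decide (m.1 < x.1) && decide (x.2 < m.2)) = true
            then some x else some m) = some x
        rw [if_pos (by simpa using hc)]
      rw [hstep]
      obtain ⟨m', h1, h2, h3, h4⟩ := ih x
      have hxm : lexLE x m := by unfold lexLE; omega
      refine ⟨m', h1, ?_, lexLE_trans h3 hxm, fun y hy => ?_⟩
      · rcases h2 with rfl | h
        · exact Or.inr List.mem_cons_self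
        · exact Or.inr (List.mem_cons_of_mem _ h)
      · rcases List.mem_cons.mp hy with rfl | hy
        · exact h3
        · exact h4 y hy
    · have hstep : minStep (some m) x = some m := by
        show (if (decide (x.1 < m.1) || !decide (m.1 < x.1) && decide (x.2 < m.2)) = true
            then some x else some m) = some m
        rw [if_neg (by simp only [Bool.or_eq_true, Bool.and_eq_true, Bool.not_eq_true',
          decide_eq_true_eq, decide_eq_false_iff_not]; exact hc)]
      rw [hstep]
      obtain ⟨m', h1, h2, h3, h4⟩ := ih m
      have hmx : lexLE m x := by unfold lexLE; omega
      refine ⟨m', h1, ?_, h3, fun y hy => ?_⟩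
      · rcases h2 with rfl | h
        · exact Or.inl rfl
        · exact Or.inr (List.mem_cons_of_mem _ h)
      · rcases List.mem_cons.mp hy with rfl | hy
        · exact lexLE_trans h3 hmx
        · exact h4 y hy

theorem foldl_minStep_min (l : List (Int × Int)) (hl : l ≠ []) :
    ∃ m', l.foldl minStep none = some m' ∧ m' ∈ l ∧ ∀ x ∈ l, lexLE m' x := by
  cases l with
  | nil => exact absurd rfl hl
  | cons p t =>
    obtain ⟨m', hfold, hmem, hle, hall⟩ := foldl_minStep_some t p
    refine ⟨m', by rw [List.foldl_cons]; exact hfold, ?_, ?_⟩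
    · rcases hmem with rfl | h
      · exact List.mem_cons_self
      · exact List.mem_cons_of_mem _ h
    · intro x hx
      rcases List.mem_cons.mp hx with rfl | hx
      · exact hle
      · exact hall x hx

-- B's shorter/longer choice is the lexicographic minimum of (diff, length)
theorem b_candidate (out : Int) (lengths : List Int) (hne : lengths ≠ []) :
    ∃ b, (if lengths.filter (fun L => decide (L < out)) = [] then
            PySem.List.min? (lengths.filter (fun L => decide (out ≤ L))) (fun L => L)
          else if lengths.filter (fun L => decide (out ≤ L)) = [] then
            PySem.List.max? (lengths.filter (fun L => decide (L < out))) (fun L => L)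
          else
            match PySem.List.max? (lengths.filter (fun L => decide (L < out))) (fun L => L),
                  PySem.List.min? (lengths.filter (fun L => decide (out ≤ L))) (fun L => L) with
            | some lo, some hi => some (if out - lo ≤ hi - out then lo else hi)
            | _, _ => none) = some b
      ∧ b ∈ lengths ∧ ∀ L ∈ lengths, lexLE (|out - b|, b) (|out - L|, L) := by
  have hmem_sh : ∀ L ∈ lengths.filter (fun L => decide (L < out)), L ∈ lengths ∧ L < out := by
    intro L hL
    exact ⟨List.mem_of_mem_filter hL, by simpa using List.of_mem_filter hL⟩
  have hmem_lg : ∀ L ∈ lengths.filter (fun L => decide (out ≤ L)), L ∈ lengths ∧ out ≤ L := by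
    intro L hL
    exact ⟨List.mem_of_mem_filter hL, by simpa using List.of_mem_filter hL⟩
  have hin_sh : ∀ L ∈ lengths, L < out → L ∈ lengths.filter (fun L => decide (L < out)) :=
    fun L hL h => List.mem_filter.mpr ⟨hL, by simpa using h⟩
  have hin_lg : ∀ L ∈ lengths, out ≤ L → L ∈ lengths.filter (fun L => decide (out ≤ L)) :=
    fun L hL h => List.mem_filter.mpr ⟨hL, by simpa using h⟩
  have habs_lt : ∀ L : Int, L < out → |out - L| = out - L := fun L h => abs_of_nonneg (by omega)
  have habs_ge : ∀ L : Int, out ≤ L → |out - L| = L - out := fun L h => by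
    rw [abs_sub_comm, abs_of_nonneg (by omega)]
  by_cases hshe : lengths.filter (fun L => decide (L < out)) = []
  · rw [if_pos hshe]
    have hlgne : lengths.filter (fun L => decide (out ≤ L)) ≠ [] := by
      intro h0
      obtain ⟨L, hL⟩ := List.exists_mem_of_ne_nil lengths hne
      rcases lt_or_ge L out with hc | hc
      · have := hin_sh L hL hc; rw [hshe] at this; simp at this
      · have := hin_lg L hL hc; rw [h0] at this; simp at this
    cases hmin : PySem.List.min? (lengths.filter (fun L => decide (out ≤ L))) (fun L => L) with
    | none => exact absurd ((PySem.List.min?_eq_none_iff _ _).mp hmin) hlgne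
    | some hi =>
      obtain ⟨hhi1, hhi2⟩ := hmem_lg hi (PySem.List.min?_mem hmin)
      refine ⟨hi, rfl, hhi1, fun L hL => ?_⟩
      have hLlg : L ∈ lengths.filter (fun L => decide (out ≤ L)) := by
        rcases lt_or_ge L out with hc | hc
        · have := hin_sh L hL hc; rw [hshe] at this; simp at this
        · exact hin_lg L hL hc
      have hmono := PySem.List.min?_isMin hmin L hLlg
      rw [habs_ge hi hhi2, habs_ge L (hmem_lg L hLlg).2]
      unfold lexLE; simp only at hmono; omega
  · rw [if_neg hshe]
    cases hmax : PySem.List.max? (lengths.filter (fun L => decide (L < out))) (fun L => L) with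
    | none => exact absurd ((PySem.List.max?_eq_none_iff _ _).mp hmax) hshe
    | some lo =>
      obtain ⟨hlo1, hlo2⟩ := hmem_sh lo (PySem.List.max?_mem hmax)
      by_cases hlge : lengths.filter (fun L => decide (out ≤ L)) = []
      · rw [if_pos hlge]
        refine ⟨lo, rfl, hlo1, fun L hL => ?_⟩
        have hLsh : L ∈ lengths.filter (fun L => decide (L < out)) := by
          rcases lt_or_ge L out with hc | hc
          · exact hin_sh L hL hc
          · have := hin_lg L hL hc; rw [hlge] at this; simp at this
        have hmono := PySem.List.max?_isMax hmax L hLsh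
        rw [habs_lt lo hlo2, habs_lt L (hmem_sh L hLsh).2]
        unfold lexLE; simp only at hmono; omega
      · rw [if_neg hlge]
        cases hmin : PySem.List.min? (lengths.filter (fun L => decide (out ≤ L))) (fun L => L) with
        | none => exact absurd ((PySem.List.min?_eq_none_iff _ _).mp hmin) hlge
        | some hi =>
          obtain ⟨hhi1, hhi2⟩ := hmem_lg hi (PySem.List.min?_mem hmin)
          have hbound : ∀ L ∈ lengths, (L < out → L ≤ lo) ∧ (out ≤ L → hi ≤ L) := by
            intro L hL
            constructor
            · intro hc
              have := PySem.List.max?_isMax hmax L (hin_sh L hL hc)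
              simpa using this
            · intro hc
              have := PySem.List.min?_isMin hmin L (hin_lg L hL hc)
              simpa using this
          by_cases hcmp : out - lo ≤ hi - out
          · refine ⟨lo, by simp [hcmp], hlo1, fun L hL => ?_⟩
            rw [habs_lt lo hlo2]
            rcases lt_or_ge L out with hc | hc
            · rw [habs_lt L hc]
              have := (hbound L hL).1 hc
              unfold lexLE; omega
            · rw [habs_ge L hc]
              have := (hbound L hL).2 hc
              unfold lexLE; omega
          · refine ⟨hi, by simp [hcmp], hhi1, fun L hL => ?_⟩
            rw [habs_ge hi hhi2]
            rcases lt_or_ge L out with hc | hc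
            · rw [habs_lt L hc]
              have := (hbound L hL).1 hc
              unfold lexLE; omega
            · rw [habs_ge L hc]
              have := (hbound L hL).2 hc
              unfold lexLE; omega

theorem lex_min_unique (l : List (Int × Int)) (m c : Int × Int)
    (hm : m ∈ l) (hmle : ∀ x ∈ l, lexLE m x) (hc : c ∈ l) (hcle : ∀ x ∈ l, lexLE c x) : m = c := by
  have h1 := hmle c hc
  have h2 := hcle m hm
  obtain ⟨m1, m2⟩ := m
  obtain ⟨c1, c2⟩ := c
  simp only [lexLE] at h1 h2
  ext <;> simp <;> omega

-- ===== VERDICT (by name: the statement is the Claim_ definition above) =====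
theorem ref_stats_spec : Claim_equal_ref_stats := by
  intro output refs _
  show ref_stats output refs = ref_stats_alt output refs
  have hrel := rel_fold refs PySem.Dict.empty PySem.Dict.empty 0 rel_empty
  have hitems := items_of_rel _ _ _ hrel
  dsimp only [ref_stats, ref_stats_alt]
  rw [PySem.List.foldl_prod_mk (f := pyNgramStep) (g := pyClosestStep output)]
  by_cases hrefs : refs = []
  · subst hrefs
    rfl
  · rw [if_neg hrefs]
    rw [show ((none, none) : Option Int × Option Int) = opt2 none from rfl, closest_fold_eq]
    have hpairs : refs.map (fun r => (|((PySem.Str.split₀ output).length : Int) - ((PySem.Str.split₀ r).length : Int)|,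
        ((PySem.Str.split₀ r).length : Int)))
        = (refs.map (fun r => ((PySem.Str.split₀ r).length : Int))).map
            (fun L => (|((PySem.Str.split₀ output).length : Int) - L|, L)) := by
      rw [List.map_map]
      rfl
    rw [hpairs]
    have hlne : refs.map (fun r => ((PySem.Str.split₀ r).length : Int)) ≠ [] := by
      simp [hrefs]
    obtain ⟨m', hm'fold, hm'mem, hm'min⟩ :=
      foldl_minStep_min _ (by simp [hrefs] :
        (refs.map (fun r => ((PySem.Str.split₀ r).length : Int))).map
          (fun L => (|((PySem.Str.split₀ output).length : Int) - L|, L)) ≠ [])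
    rw [hm'fold]
    obtain ⟨b, hbest, hbmem, hbmin⟩ :=
      b_candidate ((PySem.Str.split₀ output).length : Int)
        (refs.map (fun r => ((PySem.Str.split₀ r).length : Int))) hlne
    rw [hbest]
    have hcand_mem : (|((PySem.Str.split₀ output).length : Int) - b|, b)
        ∈ (refs.map (fun r => ((PySem.Str.split₀ r).length : Int))).map
            (fun L => (|((PySem.Str.split₀ output).length : Int) - L|, L)) :=
      List.mem_map_of_mem hbmem
    have hcand_min : ∀ x ∈ (refs.map (fun r => ((PySem.Str.split₀ r).length : Int))).map
        (fun L => (|((PySem.Str.split₀ output).length : Int) - L|, L)),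
        lexLE (|((PySem.Str.split₀ output).length : Int) - b|, b) x := by
      intro x hx
      obtain ⟨L, hL, rfl⟩ := List.mem_map.mp hx
      exact hbmin L hL
    have hmb : m' = (|((PySem.Str.split₀ output).length : Int) - b|, b) :=
      lex_min_unique _ _ _ hm'mem hm'min hcand_mem hcand_min
    rw [hmb]
    exact Prod.ext (by exact hitems) rfl
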